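-- pv_equiv track=rewrite | github.com/Beliavsky/Pure-Fortran | xformat_mismatch.py | skip_quoted
-- ===== SOURCE A (Python) =====
-- def skip_quoted(text: str, pos: int) -> int:
--     q = text[pos]
--     j = pos + 1
--     while j < len(text):
--         if text[j] == q:
--             # doubled quote escape
--             if j + 1 < len(text) and text[j + 1] == q:
--                 j += 2
--                 continue
--             return j + 1
--         j += 1
--     return j
-- ===== SOURCE B (Python) =====
-- def skip_quoted(text: str, pos: int) -> int:
--     q = text[pos]
--     n = len(text)
--     j = pos + 1
--     while True:
--         k = text.find(q, j)
--         if k == -1: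
--             return n
--         if k + 1 < n and text[k + 1] == q:
--             j = k + 2
--         else:
--             return k + 1
-- ===== Notes on version B (the rewrite author's own statement) =====
-- stated objective: alternative
-- what changed: B replaces A's per-character while loop (test text[j]==q at every index) by a find-driven scan that jumps between quote occurrences with str.find and only inspects the character after each hit for the doubled-quote escape.
-- outside the precondition, e.g. on skip_quoted("'x", -2): A returns 1, B returns 2
import Mathlib
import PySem

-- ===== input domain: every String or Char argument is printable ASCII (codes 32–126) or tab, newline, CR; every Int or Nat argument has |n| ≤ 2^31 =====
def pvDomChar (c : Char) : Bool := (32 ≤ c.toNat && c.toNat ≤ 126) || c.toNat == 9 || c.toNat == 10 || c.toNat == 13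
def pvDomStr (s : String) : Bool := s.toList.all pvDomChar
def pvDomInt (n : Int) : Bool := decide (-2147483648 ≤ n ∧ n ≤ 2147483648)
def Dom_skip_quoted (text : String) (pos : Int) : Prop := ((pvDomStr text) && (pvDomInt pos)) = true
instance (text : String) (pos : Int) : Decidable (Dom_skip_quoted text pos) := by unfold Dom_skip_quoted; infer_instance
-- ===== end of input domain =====

-- B replaces A's per-character while loop by a find-driven scan over quote occurrences; equivalence proved for 0 ≤ pos < len(text).

-- ===== PORT A =====
-- the 'while j < len(text)' loop of A; j steps by 1 or 2
def skipALoop (cs : List Char) (q : Char) (j : Int) : Int :=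
  if j < (cs.length : Int) then
    match PySem.List.pyGet? cs j with
    | none => 0   -- Python IndexError (only reachable outside Pre_)
    | some c =>
      if c = q then
        if j + 1 < (cs.length : Int) ∧ PySem.List.pyGet? cs (j + 1) = some q then
          skipALoop cs q (j + 2)
        else j + 1
      else skipALoop cs q (j + 1)
  else j
termination_by ((cs.length : Int) - j).toNat
decreasing_by all_goals omega

def skip_quoted (text : String) (pos : Int) : Int :=
  match PySem.Str.pyGet? text pos with
  | none => 0   -- Python IndexError on text[pos]; excluded by Pre_
  | some q => skipALoop text.toList q (pos + 1)

-- ===== PORT B =====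
-- the 'while True' loop of B, with fuel (j strictly increases, so len(text)+1 passes never run out)
def skipBLoop (text : String) (q : Char) (n : Int) : Nat → Int → Int
  | 0, _ => 0   -- fuel exhausted: unreachable from skip_quoted_alt
  | fuel + 1, j =>
    let k := PySem.Str.findFrom text (String.ofList [q]) j
    if k = -1 then n
    else if k + 1 < n ∧ PySem.Str.pyGet? text (k + 1) = some q then
      skipBLoop text q n fuel (k + 2)
    else k + 1

def skip_quoted_alt (text : String) (pos : Int) : Int :=
  match PySem.Str.pyGet? text pos with
  | none => 0   -- Python IndexError on text[pos]; excluded by Pre_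
  | some q => skipBLoop text q (PySem.Str.len text) ((PySem.Str.len text).toNat + 1) (pos + 1)

-- ===== PRECONDITION & SPEC =====
-- Pre_ keeps the natural domain 0 ≤ pos < len(text): pos ≥ len(text) or pos < -len(text) raises
-- IndexError in both A and B; for -len(text) ≤ pos < 0 A returns a value only by Python's
-- negative-index wraparound (its scan visits end-of-string characters and then restarts at
-- index 0 — an artefact of indexing with a negative j), which B's find-based scan does not share.
def Pre_skip_quoted (text : String) (pos : Int) : Prop :=
  0 ≤ pos ∧ pos < (text.toList.length : Int)
instance (text : String) (pos : Int) : Decidable (Pre_skip_quoted text pos) := by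
  unfold Pre_skip_quoted; infer_instance

def pvWitness_skip_quoted : String × Int := ("'ab''c'x", 0)

def Spec_skip_quoted (text : String) (pos : Int) (out : Int) : Prop := out = skip_quoted_alt text pos
instance (text : String) (pos : Int) (out : Int) : Decidable (Spec_skip_quoted text pos out) := by unfold Spec_skip_quoted; infer_instance

-- ===== CLAIM (what is proved, stated in full; the proofs are below) =====
def Claim_equal_skip_quoted : Prop := ∀ (text : String) (pos : Int), Dom_skip_quoted text pos → Pre_skip_quoted text pos → Spec_skip_quoted text pos (skip_quoted text pos)

-- ===== LEMMAS AND PROOFS =====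

lemma singleton_infix_iff (a : Char) (l : List Char) : [a] <:+: l ↔ a ∈ l := by
  constructor
  · intro h; exact List.singleton_sublist.mp h.sublist
  · intro h
    obtain ⟨s, t, rfl⟩ := List.append_of_mem h
    exact ⟨s, t, by simp⟩

lemma find_char_nil (q : Char) : PySem.Chars.find [] [q] = -1 := by
  rw [PySem.Chars.find_eq_neg_one_iff]
  simp

lemma find_char_cons_self (q : Char) (t : List Char) : PySem.Chars.find (q :: t) [q] = 0 := by
  have hinf : [q] <:+: (q :: t) := (singleton_infix_iff q _).mpr (by simp)

  have h0 : 0 ≤ PySem.Chars.find (q :: t) [q] := (PySem.Chars.find_nonneg_iff _ _).mpr hinf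
  obtain ⟨hpre, hmin⟩ := PySem.Chars.find_spec h0
  by_contra hne
  have hpos : 0 < (PySem.Chars.find (q :: t) [q]).toNat := by omega
  exact hmin 0 hpos (by simp)

lemma find_char_cons_ne (c q : Char) (t : List Char) (h : c ≠ q) :
    PySem.Chars.find (c :: t) [q] =
      if PySem.Chars.find t [q] = -1 then -1 else 1 + PySem.Chars.find t [q] := by
  by_cases ht : PySem.Chars.find t [q] = -1
  · rw [if_pos ht, PySem.Chars.find_eq_neg_one_iff] at *
    simp only [singleton_infix_iff] at ht ⊢
    simp only [List.mem_cons, not_or]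
    exact ⟨fun hqc => h hqc.symm, ht⟩
  · rw [if_neg ht]
    have hk0 : 0 ≤ PySem.Chars.find t [q] := by
      have := PySem.Chars.neg_one_le_find t [q]; omega
    obtain ⟨hkpre, hkmin⟩ := PySem.Chars.find_spec hk0
    have hinf : [q] <:+: (c :: t) := by
      rw [singleton_infix_iff]
      have : q ∈ t.drop (PySem.Chars.find t [q]).toNat :=
        List.singleton_sublist.mp hkpre.sublist
      exact List.mem_cons_of_mem c (List.mem_of_mem_drop this)
    have hr0 : 0 ≤ PySem.Chars.find (c :: t) [q] := (PySem.Chars.find_nonneg_iff _ _).mpr hinf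
    obtain ⟨hrpre, hrmin⟩ := PySem.Chars.find_spec hr0
    set r := PySem.Chars.find (c :: t) [q] with hr
    set k := PySem.Chars.find t [q] with hk
    have hr1 : 1 ≤ r.toNat := by
      by_contra hle
      have : r.toNat = 0 := by omega
      rw [this] at hrpre
      simp only [List.drop_zero] at hrpre
      exact h (List.cons_prefix_cons.mp hrpre).1.symm
    -- (c :: t).drop r.toNat = t.drop (r.toNat - 1)
    have hdrop : (c :: t).drop r.toNat = t.drop (r.toNat - 1) := by
      conv_lhs => rw [show r.toNat = (r.toNat - 1) + 1 by omega]
      simp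
    rw [hdrop] at hrpre
    -- minimality of k: k.toNat ≤ r.toNat - 1
    have h1 : ¬ (r.toNat - 1 < k.toNat) := fun hlt => hkmin _ hlt hrpre
    -- minimality of r: prefix at k.toNat+1 in c::t
    have h2 : ¬ (k.toNat + 1 < r.toNat) := by
      intro hlt
      exact hrmin (k.toNat + 1) hlt (by simpa using hkpre)
    omega

lemma findFrom_char (text : String) (q : Char) (j : Nat) (hj : j ≤ text.toList.length) :
    PySem.Str.findFrom text (String.ofList [q]) (j : Int) =
      if PySem.Chars.find (text.toList.drop j) [q] = -1 then -1
      else (j : Int) + PySem.Chars.find (text.toList.drop j) [q] := by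
  rw [PySem.Str.findFrom_eq, String.toList_ofList, PySem.Chars.findFrom_natCast _ _ j hj]

lemma skipALoop_end (cs : List Char) (q : Char) : skipALoop cs q (cs.length : Int) = cs.length := by
  rw [skipALoop]; simp

lemma skipBLoop_end (text : String) (q : Char) (f : Nat) :
    skipBLoop text q (text.toList.length : Int) (f + 1) (text.toList.length : Int) =
      (text.toList.length : Int) := by
  have hk : PySem.Str.findFrom text (String.ofList [q]) ((text.toList.length : Nat) : Int) = -1 := by
    rw [findFrom_char text q text.toList.length le_rfl, List.drop_length, find_char_nil]
    simp
  rw [PySem.Str.findFrom_eq, String.toList_ofList, String.length_toList] at hk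
  simp [skipBLoop, hk]

-- main loop correspondence, on the natural domain 0 ≤ j ≤ len
lemma loop_eq (text : String) (q : Char) :
    ∀ (d j fuel : Nat), j ≤ text.toList.length → text.toList.length ≤ j + d →
      text.toList.length + 1 ≤ fuel + j →
      skipALoop text.toList q (j : Int) = skipBLoop text q (text.toList.length : Int) fuel (j : Int) := by
  intro d
  induction d with
  | zero =>
    intro j fuel hj hd hfuel
    have hjn : j = text.toList.length := by omega
    obtain ⟨f, rfl⟩ : ∃ f, fuel = f + 1 := ⟨fuel - 1, by omega⟩
    subst hjn
    rw [skipALoop_end, skipBLoop_end]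
  | succ d ih =>
    intro j fuel hj hd hfuel
    by_cases hjn : j = text.toList.length
    · obtain ⟨f, rfl⟩ : ∃ f, fuel = f + 1 := ⟨fuel - 1, by omega⟩
      subst hjn
      rw [skipALoop_end, skipBLoop_end]
    · have hjlt : j < text.toList.length := by omega
      obtain ⟨f, rfl⟩ : ∃ f, fuel = f + 1 := ⟨fuel - 1, by omega⟩
      have hdrop := List.drop_eq_getElem_cons hjlt
      have hget : PySem.List.pyGet? text.toList (j : Int) = some text.toList[j] :=
        PySem.List.pyGet?_ofNat _ j hjlt
      by_cases hcq : text.toList[j] = q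
      · -- character at j is the quote: find returns j itself
        have hk : PySem.Str.findFrom text (String.ofList [q]) (j : Int) = (j : Int) := by
          rw [findFrom_char text q j (le_of_lt hjlt), hdrop, hcq, find_char_cons_self]
          simp
        rw [skipALoop, skipBLoop]
        simp only [hk, hget, if_pos (show (j : Int) < (text.toList.length : Int) by omega), hcq,
          PySem.Str.pyGet?_eq, PySem.Chars.pyGet?_eq_listPyGet?,
          if_neg (show ¬ (j : Int) = -1 by omega)]
        by_cases hc : (j : Int) + 1 < (text.toList.length : Int) ∧
            PySem.List.pyGet? text.toList ((j : Int) + 1) = some q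
        · rw [if_pos hc, if_pos hc,
            show (j : Int) + 2 = ((j + 2 : Nat) : Int) by push_cast; ring]
          exact ih (j + 2) f (by omega) (by omega) (by omega)
        · simp only [if_neg hc]
          simp
      · -- character at j is not the quote: find from j equals find from j+1
        have hkk : PySem.Str.findFrom text (String.ofList [q]) (j : Int) =
            PySem.Str.findFrom text (String.ofList [q]) ((j + 1 : Nat) : Int) := by
          rw [findFrom_char text q j (le_of_lt hjlt), findFrom_char text q (j + 1) (by omega),
            hdrop, find_char_cons_ne _ _ _ hcq]
          by_cases hF : PySem.Chars.find (text.toList.drop (j + 1)) [q] = -1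
          · simp [hF]
          · have hge : 0 ≤ PySem.Chars.find (text.toList.drop (j + 1)) [q] := by
              have := PySem.Chars.neg_one_le_find (text.toList.drop (j + 1)) [q]; omega
            rw [if_neg hF, if_neg hF,
              if_neg (show ¬(1 + PySem.Chars.find (text.toList.drop (j + 1)) [q] = -1) by omega)]
            push_cast; ring
        have hB : skipBLoop text q (text.toList.length : Int) (f + 1) (j : Int) =
            skipBLoop text q (text.toList.length : Int) (f + 1) ((j + 1 : Nat) : Int) := by
          rw [skipBLoop, skipBLoop, hkk]
        rw [hB, skipALoop]
        simp only [hget, if_pos (show (j : Int) < (text.toList.length : Int) by omega),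
          if_neg hcq]
        rw [show (j : Int) + 1 = ((j + 1 : Nat) : Int) by push_cast; ring]
        exact ih (j + 1) (f + 1) (by omega) (by omega) (by omega)

theorem skip_quoted_spec : Claim_equal_skip_quoted := by
  intro text pos hdom hpre
  obtain ⟨h0, hlt⟩ := hpre
  obtain ⟨p, rfl⟩ : ∃ p : Nat, pos = (p : Int) := ⟨pos.toNat, by omega⟩
  have hp : p < text.toList.length := by omega
  have hq : PySem.Str.pyGet? text (p : Int) = some text.toList[p] := by
    rw [PySem.Str.pyGet?_natCast]; exact List.getElem?_eq_getElem hp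
  unfold Spec_skip_quoted skip_quoted skip_quoted_alt
  rw [hq]
  simp only [PySem.Str.len_eq]
  rw [show (p : Int) + 1 = ((p + 1 : Nat) : Int) by push_cast; ring]
  rw [show ((text.toList.length : Int)).toNat + 1 = text.toList.length + 1 by omega]
  exact loop_eq text _ text.toList.length (p + 1) (text.toList.length + 1)
    (by omega) (by omega) (by omega)
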